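-- pv_equiv track=rewrite | github.com/HenryArevaloBarrera/ProyectoLenguajesFormales | core/tokenizer.py | tokeniza_nave
-- ===== SOURCE A (Python) =====
-- def tokeniza_nave(lineas):
--     """
--     Tokeniza la línea única de la sección [nave] con todos los campos separados por comas.
--     """
--     tokens = []
--     if not lineas:
--         return ["fin"]
--
--     # Tomamos solo la primera línea porque se espera una sola línea con todos los campos
--     contenido = lineas[0].strip().lower()
--     partes = [p.strip() for p in contenido.split(",")]
--
--     for parte in partes:
--         if parte.startswith("nombre:"):
--             tokens.append("nombre")
--         elif parte.startswith("velocidad:"):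
--             tokens.append("velocidad")
--         elif parte.startswith("combustible:"):
--             tokens.append("combustible")
--         elif parte.startswith("restricciones:"):
--             tokens.append("restricciones")
--         else:
--             tokens.append("desconocido")  # útil para detectar errores
--     tokens.append("fin")
--     return tokens
-- ===== SOURCE B (Python) =====
-- _CAMPOS = ("nombre", "velocidad", "combustible", "restricciones")
--
--
-- def _clasifica(parte):
--     s = parte.strip()
--     for campo in _CAMPOS:
--         if s.startswith(campo + ":"):
--             return campo
--     return "desconocido"
--
--
-- def tokeniza_nave(lineas):
--     if not lineas:
--         return ["fin"]
--     contenido = lineas[0].strip().lower()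
--     tokens = []
--     buf = ""
--     for ch in contenido + ",":
--         if ch == ",":
--             tokens.append(_clasifica(buf))
--             buf = ""
--         else:
--             buf += ch
--     tokens.append("fin")
--     return tokens
-- ===== Notes on version B (the rewrite author's own statement) =====
-- stated objective: alternative
-- what changed: Replaces A's staged passes (split on ',', strip each part, startswith if/elif chain per part) with a single character-level scanner that accumulates a buffer and flushes it at each comma through a table-driven classifier (first field name in a tuple whose 'campo:' prefix matches).
import Mathlib
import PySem

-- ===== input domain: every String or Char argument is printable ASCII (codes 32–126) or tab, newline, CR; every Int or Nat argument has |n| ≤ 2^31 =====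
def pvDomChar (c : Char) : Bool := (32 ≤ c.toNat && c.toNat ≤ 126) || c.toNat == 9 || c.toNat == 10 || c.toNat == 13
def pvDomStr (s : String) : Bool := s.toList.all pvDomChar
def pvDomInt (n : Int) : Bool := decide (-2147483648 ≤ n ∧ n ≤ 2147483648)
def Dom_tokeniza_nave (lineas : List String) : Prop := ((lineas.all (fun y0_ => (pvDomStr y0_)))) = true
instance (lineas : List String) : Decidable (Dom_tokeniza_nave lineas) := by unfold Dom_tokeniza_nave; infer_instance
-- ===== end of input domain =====

-- B replaces A's split/strip/classify staged passes by a single character-level scanner with a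
-- buffer (comma flushes the buffer through a table-driven classifier); alternative, same cost.

-- ===== PORT A =====
def tokeniza_nave (lineas : List String) : List String :=
  match lineas with
  | [] => ["fin"]
  | l0 :: _ =>
    let contenido := PySem.Str.lower (PySem.Str.strip l0)
    let partes := ((PySem.Str.split? contenido ",").getD []).map PySem.Str.strip
    let tokens := partes.foldl (fun acc parte =>
      acc ++ [if PySem.Str.startswith parte "nombre:" then "nombre"
              else if PySem.Str.startswith parte "velocidad:" then "velocidad"
              else if PySem.Str.startswith parte "combustible:" then "combustible"
              else if PySem.Str.startswith parte "restricciones:" then "restricciones"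
              else "desconocido"]) []
    tokens ++ ["fin"]

-- ===== PORT B =====
-- the for-loop over _CAMPOS with early return, as find-first on the same tuple
def pvClasifica (parte : String) : String :=
  let s := PySem.Str.strip parte
  match ["nombre", "velocidad", "combustible", "restricciones"].find?
      (fun campo => PySem.Str.startswith s (campo ++ ":")) with
  | some campo => campo
  | none => "desconocido"

def tokeniza_nave_alt (lineas : List String) : List String :=
  match lineas with
  | [] => ["fin"]
  | l0 :: _ =>
    let contenido := PySem.Str.lower (PySem.Str.strip l0)
    -- for ch in contenido + ",": flush buf at ',', else extend buf
    let fin := (contenido.toList ++ [',']).foldl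
      (fun (st : List String × List Char) ch =>
        if ch = ',' then (st.1 ++ [pvClasifica (String.ofList st.2)], [])
        else (st.1, st.2 ++ [ch])) ([], [])
    fin.1 ++ ["fin"]

-- ===== PRECONDITION & SPEC =====
def Spec_tokeniza_nave (lineas : List String) (out : List String) : Prop := out = tokeniza_nave_alt lineas
instance (lineas : List String) (out : List String) : Decidable (Spec_tokeniza_nave lineas out) := by unfold Spec_tokeniza_nave; infer_instance

-- ===== CLAIM (what is proved, stated in full; the proofs are below) =====
def Claim_equal_tokeniza_nave : Prop := ∀ (lineas : List String), Dom_tokeniza_nave lineas → Spec_tokeniza_nave lineas (tokeniza_nave lineas)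

-- ===== LEMMAS AND PROOFS =====

-- reference split on ',' used to describe both sides
def pvSplit : List Char → List (List Char)
  | [] => [[]]
  | c :: rest =>
    if c = ',' then [] :: pvSplit rest
    else match pvSplit rest with
      | p :: ps => (c :: p) :: ps
      | [] => [[c]]

theorem pvSplit_ne_nil (cs : List Char) : pvSplit cs ≠ [] := by
  cases cs with
  | nil => simp [pvSplit]
  | cons c rest =>
    simp only [pvSplit]
    split_ifs
    · simp
    · cases h : pvSplit rest <;> simp

-- PySem's splitOn on a single-char separator computes pvSplit
theorem go_spec (fuel : Nat) (l cur : List Char) (acc : List (List Char)) (h : l.length < fuel) :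
    PySem.Chars.splitOn.go [','] fuel l cur acc =
      acc.reverse ++ (match pvSplit l with
        | q :: qs => (cur.reverse ++ q) :: qs
        | [] => [cur.reverse]) := by
  induction fuel generalizing l cur acc with
  | zero => omega
  | succ f ih =>
    cases l with
    | nil => simp [PySem.Chars.splitOn.go, pvSplit]
    | cons c rest =>
      by_cases hc : c = ','
      · subst hc
        rw [show PySem.Chars.splitOn.go [','] (f+1) (',' :: rest) cur acc
              = PySem.Chars.splitOn.go [','] f rest [] (cur.reverse :: acc) from by
            simp [PySem.Chars.splitOn.go, List.isPrefixOf]]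
        rw [ih rest [] (cur.reverse :: acc) (by simpa using Nat.lt_of_succ_lt_succ h)]
        simp only [pvSplit, if_pos]
        cases hq : pvSplit rest with
        | nil => exact absurd hq (pvSplit_ne_nil rest)
        | cons q qs => simp
      · rw [show PySem.Chars.splitOn.go [','] (f+1) (c :: rest) cur acc
              = PySem.Chars.splitOn.go [','] f rest (c :: cur) acc from by
            simp only [PySem.Chars.splitOn.go, List.isPrefixOf, Bool.and_eq_true, beq_iff_eq]
            rw [if_neg (by simp [Ne.symm hc])]]
        rw [ih rest (c :: cur) acc (by simpa using Nat.lt_of_succ_lt_succ h)]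
        simp only [pvSplit, if_neg hc]
        cases hq : pvSplit rest with
        | nil => exact absurd hq (pvSplit_ne_nil rest)
        | cons q qs => simp

theorem splitOn_comma (cs : List Char) : PySem.Chars.splitOn cs [','] = pvSplit cs := by
  unfold PySem.Chars.splitOn
  rw [go_spec (cs.length + 1) cs [] [] (by omega)]
  cases hq : pvSplit cs with
  | nil => exact absurd hq (pvSplit_ne_nil cs)
  | cons q qs => simp

-- A's per-part if/elif chain equals B's find-first over the campo table (on a stripped part)
theorem clasifica_eq (q : List Char) :
    (if PySem.Str.startswith (PySem.Str.strip (String.ofList q)) "nombre:" then "nombre"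
     else if PySem.Str.startswith (PySem.Str.strip (String.ofList q)) "velocidad:" then "velocidad"
     else if PySem.Str.startswith (PySem.Str.strip (String.ofList q)) "combustible:" then "combustible"
     else if PySem.Str.startswith (PySem.Str.strip (String.ofList q)) "restricciones:" then "restricciones"
     else "desconocido") = pvClasifica (String.ofList q) := by
  unfold pvClasifica
  have h1 : "nombre" ++ ":" = "nombre:" := rfl
  have h2 : "velocidad" ++ ":" = "velocidad:" := rfl
  have h3 : "combustible" ++ ":" = "combustible:" := rfl
  have h4 : "restricciones" ++ ":" = "restricciones:" := rfl
  simp only [List.find?, h1, h2, h3, h4]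
  split_ifs <;> simp_all

-- A's append-only foldl is a map
theorem foldl_append_map {α β : Type} (f : α → β) (l : List α) (acc : List β) :
    l.foldl (fun a x => a ++ [f x]) acc = acc ++ l.map f := by
  induction l generalizing acc with
  | nil => simp
  | cons x xs ih => simp [ih]

-- the scanner over cs ++ [','] produces one classified token per pvSplit part
theorem scan_spec (cs : List Char) (toks : List String) (buf : List Char) :
    (cs ++ [',']).foldl
      (fun (st : List String × List Char) ch =>
        if ch = ',' then (st.1 ++ [pvClasifica (String.ofList st.2)], [])
        else (st.1, st.2 ++ [ch])) (toks, buf) =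
      (toks ++ (match pvSplit cs with
        | q :: qs => pvClasifica (String.ofList (buf ++ q)) :: qs.map (fun p => pvClasifica (String.ofList p))
        | [] => [pvClasifica (String.ofList buf)]), []) := by
  induction cs generalizing toks buf with
  | nil => simp [pvSplit]
  | cons c rest ih =>
    by_cases hc : c = ','
    · subst hc
      simp only [List.cons_append, List.foldl_cons, if_pos]
      rw [ih]
      simp only [pvSplit, if_pos]
      cases hq : pvSplit rest with
      | nil => exact absurd hq (pvSplit_ne_nil rest)
      | cons q qs => simp
    · simp only [List.cons_append, List.foldl_cons, if_neg hc]
      rw [ih]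
      simp only [pvSplit, if_neg hc]
      cases hq : pvSplit rest with
      | nil => exact absurd hq (pvSplit_ne_nil rest)
      | cons q qs => simp

-- ===== VERDICT (by name: the statement is the Claim_ definition above) =====
theorem tokeniza_nave_spec : Claim_equal_tokeniza_nave := by
  intro lineas _
  unfold Spec_tokeniza_nave tokeniza_nave tokeniza_nave_alt
  cases lineas with
  | nil => rfl
  | cons l0 rest =>
    simp only []
    rw [scan_spec]
    have hsplit : (PySem.Str.split? (PySem.Str.lower (PySem.Str.strip l0)) ",").getD []
        = (pvSplit (PySem.Str.lower (PySem.Str.strip l0)).toList).map String.ofList := by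
      simp [PySem.Str.split?, PySem.Chars.split?, splitOn_comma]
    rw [hsplit, foldl_append_map]
    cases hq : pvSplit (PySem.Str.lower (PySem.Str.strip l0)).toList with
    | nil => exact absurd hq (pvSplit_ne_nil _)
    | cons q qs =>
      simp only [List.map_map, List.map_cons, List.nil_append, Function.comp_def]
      rw [clasifica_eq q, List.map_congr_left (fun x _ => clasifica_eq x)]
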